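-- pv_equiv track=rewrite | github.com/seungjaejeon/for_pccp | seungjae/5주차_외톨이알파벳.py | solution
-- ===== SOURCE A (Python) =====
-- def solution(input_string):
--     answer = ''
--     alphabet = [[] for _ in range(97, 123)]
--     l = len(input_string)
--
--     if l == 1:
--         return 'N'
--     else:
--         for i in range(l):
--             alphabet[ord(input_string[i]) - 97].append(i)
--     for i in range(26):
--         if len(alphabet[i]) >= 2:
--             for j in range(len(alphabet[i])-1):
--                 if alphabet[i][j+1] - alphabet[i][j] > 1:
--                     answer += chr(i + 97)
--                     break
--
--
--     if answer == '':
--         return 'N'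
--     else:
--         return answer
-- ===== SOURCE B (Python) =====
-- def solution(input_string):
--     if len(input_string) == 1:
--         return 'N'
--     last = [None] * 26
--     lonely = [False] * 26
--     for i, c in enumerate(input_string):
--         idx = ord(c) - 97
--         prev = last[idx]
--         if prev is not None and i - prev > 1:
--             lonely[idx] = True
--         last[idx] = i
--     answer = ''.join(chr(i + 97) for i in range(26) if lonely[i])
--     return answer if answer else 'N'
-- ===== Notes on version B (the rewrite author's own statement) =====
-- stated objective: simpler
-- what changed: Replaces A's bucket-of-position-lists construction plus a second rescan of every bucket for gaps by a single pass that keeps only the last seen position and a lonely flag per letter, then emits flagged letters in alphabet order.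
import Mathlib
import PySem

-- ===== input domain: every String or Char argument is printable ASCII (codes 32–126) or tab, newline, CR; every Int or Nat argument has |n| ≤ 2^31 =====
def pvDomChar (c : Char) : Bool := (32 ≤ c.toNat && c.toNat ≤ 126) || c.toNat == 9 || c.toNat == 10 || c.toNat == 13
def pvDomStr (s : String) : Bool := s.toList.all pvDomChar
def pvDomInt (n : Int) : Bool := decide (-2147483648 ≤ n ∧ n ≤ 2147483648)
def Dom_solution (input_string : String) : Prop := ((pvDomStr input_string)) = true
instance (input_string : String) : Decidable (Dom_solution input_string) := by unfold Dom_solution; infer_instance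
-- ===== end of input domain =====

-- B replaces A's bucket-of-positions construction and quadratic-shaped rescan by a single pass
-- keeping only last-position and lonely flags per letter (objective: simpler one-pass algorithm).

-- ===== PORT A =====
-- inner 'for j in range(len(bucket)-1): if bucket[j+1]-bucket[j] > 1: … break' loop of A
def pvABreak (bucket : List Int) : List Int → Bool
  | [] => false
  | j :: rest =>
    if PySem.List.pyGetD bucket (j + 1) 0 - PySem.List.pyGetD bucket j 0 > 1 then true
    else pvABreak bucket rest

def solution (input_string : String) : String :=
  let l : Int := PySem.Str.len input_string
  if l = 1 then "N"
  else
    let alphabet : List (List Int) := (List.range 26).map (fun _ => ([] : List Int))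
    let alphabet := (PySem.List.pyRange 0 l 1).foldl (fun alph i =>
      let idx : Int := ((PySem.List.pyGetD input_string.toList i ' ').toNat : Int) - 97
      PySem.List.pySetD alph idx (PySem.List.pyGetD alph idx [] ++ [i])) alphabet
    let answer : List Char := (PySem.List.pyRange 0 26 1).foldl (fun ans i =>
      let bucket := PySem.List.pyGetD alphabet i []
      if (2 ≤ bucket.length) && pvABreak bucket (PySem.List.pyRange 0 ((bucket.length : Int) - 1) 1)
      then ans ++ [Char.ofNat (i.toNat + 97)] else ans) []
    if answer = [] then "N" else String.ofList answer

-- ===== PORT B =====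
def solution_alt (input_string : String) : String :=
  if PySem.Str.len input_string = 1 then "N"
  else
    let st := (PySem.List.enumerate input_string.toList 0).foldl
      (fun (st : List (Option Int) × List Bool) p =>
        let idx : Int := ((p.2.toNat : Int)) - 97
        let lonely := match PySem.List.pyGetD st.1 idx none with
          | some j => if p.1 - j > 1 then PySem.List.pySetD st.2 idx true else st.2
          | none => st.2
        (PySem.List.pySetD st.1 idx (some p.1), lonely))
      (List.replicate 26 none, List.replicate 26 false)
    let answer : List Char :=
      ((List.range 26).filter (fun k : Nat => PySem.List.pyGetD st.2 ((k : Int)) false)).map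
        (fun k => Char.ofNat (k + 97))
    if answer = [] then "N" else String.ofList answer

-- ===== PRECONDITION & SPEC =====
-- Pre_ excludes exactly the inputs where A raises IndexError: a string of length ≠ 1 containing a
-- character whose code is below 71 or above 122 (ord(c)-97 then falls outside Python's ±26 index range).
def Pre_solution (input_string : String) : Prop :=
  input_string.toList.length = 1 ∨ ∀ c ∈ input_string.toList, 71 ≤ c.toNat ∧ c.toNat ≤ 122
instance (input_string : String) : Decidable (Pre_solution input_string) := by
  unfold Pre_solution; infer_instance
def pvWitness_solution : String := "a"
def Spec_solution (input_string : String) (out : String) : Prop := out = solution_alt input_string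
instance (input_string : String) (out : String) : Decidable (Spec_solution input_string out) := by unfold Spec_solution; infer_instance

-- ===== CLAIM (what is proved, stated in full; the proofs are below) =====
def Claim_equal_solution : Prop := ∀ (input_string : String), Dom_solution input_string → Pre_solution input_string → Spec_solution input_string (solution input_string)

-- ===== LEMMAS AND PROOFS =====

-- the effective 26-bucket index Python's (possibly negative) ord(c)-97 selects
def bucketIdx (c : Char) : Nat := if 97 ≤ c.toNat then c.toNat - 97 else c.toNat - 71

-- a list of positions has two consecutive entries more than 1 apart
def hasGap : List Int → Bool
  | [] => false
  | [_] => false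
  | a :: b :: rest => (decide (b - a > 1)) || hasGap (b :: rest)

lemma bucketIdx_lt (c : Char) (hc : 71 ≤ c.toNat ∧ c.toNat ≤ 122) : bucketIdx c < 26 := by
  unfold bucketIdx; split <;> omega

lemma pyGetD26 {α : Type} (xs : List α) (h : xs.length = 26) (c : Char)
    (hc : 71 ≤ c.toNat ∧ c.toNat ≤ 122) (d : α) :
    PySem.List.pyGetD xs ((c.toNat : Int) - 97) d = xs.getD (bucketIdx c) d := by
  unfold bucketIdx
  by_cases h97 : 97 ≤ c.toNat
  · have e1 : ((c.toNat : Int) - 97) = ((c.toNat - 97 : Nat) : Int) := by omega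
    rw [e1, PySem.List.pyGetD_natCast, if_pos h97]
  · have hk1 : 0 < 97 - c.toNat := by omega
    have hk2 : 97 - c.toNat ≤ xs.length := by omega
    have e1 : ((c.toNat : Int) - 97) = -((97 - c.toNat : Nat) : Int) := by omega
    rw [e1, PySem.List.pyGetD_neg_natCast xs _ d hk1 hk2, if_neg h97,
      List.getD_eq_getElem xs d (by omega)]
    congr 1
    omega

lemma pySetD26 {α : Type} (xs : List α) (h : xs.length = 26) (c : Char)
    (hc : 71 ≤ c.toNat ∧ c.toNat ≤ 122) (v : α) :
    PySem.List.pySetD xs ((c.toNat : Int) - 97) v = xs.set (bucketIdx c) v := by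
  unfold bucketIdx
  simp only [PySem.List.pySetD, PySem.List.pySet?, PySem.List.pyIdx?, h]
  split_ifs with h1 h2 h3 <;> simp_all <;>
    first
      | (exfalso; omega)
      | (congr 1; omega)

lemma hasGap_short (l : List Int) (h : l.length < 2) : hasGap l = false := by
  match l with
  | [] => rfl
  | [_] => rfl
  | a :: b :: rest => simp at h

lemma hasGap_append_singleton (l : List Int) (i : Int) :
    hasGap (l ++ [i]) = (hasGap l || match l.getLast? with
      | some j => decide (i - j > 1)
      | none => false) := by
  induction l with
  | nil => simp [hasGap]
  | cons a t ih =>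
    cases t with
    | nil => simp [hasGap]
    | cons b t' =>
      rw [show hasGap (a :: b :: t' ++ [i]) = (decide (b - a > 1) || hasGap (b :: t' ++ [i])) from rfl]
      rw [ih]
      simp [hasGap, List.getLast?_cons_cons, Bool.or_assoc]

lemma pvABreak_eq (bucket : List Int) (k : Nat) :
    pvABreak bucket (PySem.List.pyRange k ((bucket.length : Int) - 1) 1) = hasGap (bucket.drop k) := by
  induction hn : bucket.length - 1 - k generalizing k with
  | zero =>
    rw [PySem.List.pyRange_one_eq_nil (by omega)]
    rw [hasGap_short _ (by simp; omega)]
    rfl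
  | succ n ih =>
    have hk1 : k + 1 < bucket.length := by omega
    rw [PySem.List.pyRange_one_cons (by omega)]
    show (if PySem.List.pyGetD bucket ((k : Int) + 1) 0 - PySem.List.pyGetD bucket (k : Int) 0 > 1
      then true else pvABreak bucket (PySem.List.pyRange ((k : Int) + 1) ((bucket.length : Int) - 1) 1)) = _
    have ec : ((k : Int) + 1) = (((k + 1 : Nat)) : Int) := by omega
    rw [ec, PySem.List.pyGetD_natCast, PySem.List.pyGetD_natCast, ih (k + 1) (by omega)]
    rw [List.getD_eq_getElem _ _ (by omega), List.getD_eq_getElem _ _ (by omega)]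
    rw [List.drop_eq_getElem_cons (by omega : k < bucket.length),
        List.drop_eq_getElem_cons (by omega : k + 1 < bucket.length)]
    show _ = (decide (bucket[k + 1] - bucket[k] > 1) || hasGap (bucket[k + 1] :: bucket.drop (k + 1 + 1)))
    split <;> rename_i hgt
    · simp [decide_eq_true hgt]
    · simp only [decide_eq_false hgt, Bool.false_or]

-- main loop invariant: B's (last, lonely) state is the image of A's bucket state
lemma loop_inv (cs : List Char) (hcs : ∀ c ∈ cs, 71 ≤ c.toNat ∧ c.toNat ≤ 122)
    (s0 : Int) (al : List (List Int)) (last : List (Option Int)) (lon : List Bool)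
    (hal : al.length = 26) (hlast : last.length = 26) (hlon : lon.length = 26)
    (hrel : ∀ k, k < 26 → last.getD k none = (al.getD k []).getLast? ∧
        lon.getD k false = hasGap (al.getD k [])) :
    let alF := (PySem.List.enumerate cs s0).foldl (fun alph p =>
      let idx : Int := ((p.2.toNat : Int)) - 97
      PySem.List.pySetD alph idx (PySem.List.pyGetD alph idx [] ++ [p.1])) al
    let stF := (PySem.List.enumerate cs s0).foldl
      (fun (st : List (Option Int) × List Bool) p =>
        let idx : Int := ((p.2.toNat : Int)) - 97
        let lonely := match PySem.List.pyGetD st.1 idx none with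
          | some j => if p.1 - j > 1 then PySem.List.pySetD st.2 idx true else st.2
          | none => st.2
        (PySem.List.pySetD st.1 idx (some p.1), lonely))
      (last, lon)
    alF.length = 26 ∧ stF.2.length = 26 ∧
      ∀ k, k < 26 → stF.2.getD k false = hasGap (alF.getD k []) := by
  induction cs generalizing s0 al last lon with
  | nil => exact ⟨hal, hlon, fun k hk => (hrel k hk).2⟩
  | cons c rest ih =>
    have hc := hcs c (List.mem_cons_self)
    rw [PySem.List.enumerate_cons]
    simp only [List.foldl_cons]
    set e := bucketIdx c with he
    have hel : e < 26 := bucketIdx_lt c hc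
    have hA : PySem.List.pySetD al ((c.toNat : Int) - 97)
        (PySem.List.pyGetD al ((c.toNat : Int) - 97) [] ++ [s0])
        = al.set e (al.getD e [] ++ [s0]) := by
      rw [pyGetD26 al hal c hc, pySetD26 al hal c hc]
    have hLast : PySem.List.pyGetD last ((c.toNat : Int) - 97) none
        = (al.getD e []).getLast? := by
      rw [pyGetD26 last hlast c hc]; exact (hrel e hel).1
    have hSetLast : PySem.List.pySetD last ((c.toNat : Int) - 97) (some s0)
        = last.set e (some s0) := pySetD26 last hlast c hc _
    have hSetLon : PySem.List.pySetD lon ((c.toNat : Int) - 97) true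
        = lon.set e true := pySetD26 lon hlon c hc _
    -- the new B lonely list
    set lon' : List Bool := (match (al.getD e []).getLast? with
      | some j => if s0 - j > 1 then lon.set e true else lon
      | none => lon) with hlon'
    have hlon'len : lon'.length = 26 := by
      rw [hlon']
      cases (al.getD e []).getLast? with
      | none => exact hlon
      | some j => dsimp only; split <;> simp [hlon]
    rw [hA, hLast, hSetLast, hSetLon, ← hlon']
    refine ih (fun x hx => hcs x (List.mem_cons_of_mem _ hx)) (s0 + 1) _ _ _
      (by simp [hal]) (by simp [hlast]) hlon'len ?_
    intro k hk
    by_cases hke : k = e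
    · subst hke
      constructor
      · rw [List.getD_eq_getElem _ _ (by simp [hlast]; omega),
            List.getElem_set_self (by simp [hlast]; omega),
            List.getD_eq_getElem _ _ (by simp [hal]; omega),
            List.getElem_set_self (by simp [hal]; omega)]
        simp
      · rw [List.getD_eq_getElem (al.set e (al.getD e [] ++ [s0])) [] (by simp [hal]; omega),
            List.getElem_set_self (by simp [hal]; omega), hasGap_append_singleton]
        cases hgl : (al.getD e []).getLast? with
        | none =>
          simp only [hlon', hgl, Bool.or_false]
          exact (hrel e hel).2
        | some j =>
          simp only [hlon', hgl]
          by_cases hj : s0 - j > 1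
          · rw [if_pos hj,
              List.getD_eq_getElem (lon.set e true) false (by simp [hlon]; omega),
              List.getElem_set_self (by simp [hlon]; omega)]
            simp [hj]
          · rw [if_neg hj, (hrel e hel).2]
            simp [hj]
    · have hne : e ≠ k := fun h => hke h.symm
      have g1 : (last.set e (some s0)).getD k none = last.getD k none := by
        rw [List.getD_eq_getElem?_getD, List.getElem?_set_ne hne, ← List.getD_eq_getElem?_getD]
      have g2 : (al.set e (al.getD e [] ++ [s0])).getD k [] = al.getD k [] := by
        rw [List.getD_eq_getElem?_getD, List.getElem?_set_ne hne, ← List.getD_eq_getElem?_getD]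
      have g3 : lon'.getD k false = lon.getD k false := by
        cases hgl : (al.getD e []).getLast? with
        | none => simp only [hlon', hgl]
        | some j =>
          simp only [hlon', hgl]
          split
          · rw [List.getD_eq_getElem?_getD, List.getElem?_set_ne hne, ← List.getD_eq_getElem?_getD]
          · rfl
      rw [g1, g2, g3]
      exact hrel k hk

-- ===== VERDICT (by name: the statement is the Claim_ definition above) =====
lemma getD_map_range_nil (k : Nat) :
    ((List.range 26).map (fun _ => ([] : List Int))).getD k [] = [] := by
  rw [List.getD_eq_getElem?_getD, List.getElem?_map]
  cases (List.range 26)[k]? <;> rfl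

theorem solution_spec : Claim_equal_solution := by
  intro s _hdom hpre
  unfold Spec_solution solution solution_alt
  rw [PySem.Str.len_eq]
  by_cases h1 : s.toList.length = 1
  · rw [if_pos (by exact_mod_cast h1), if_pos (by exact_mod_cast h1)]
  · have hall : ∀ c ∈ s.toList, 71 ≤ c.toNat ∧ c.toNat ≤ 122 := hpre.resolve_left h1
    have hne : ((s.toList.length : Int)) ≠ 1 := by exact_mod_cast h1
    rw [if_neg hne, if_neg hne]
    simp only []
    -- rewrite A's range-fold as a fold over enumerate
    have hAfold :
        (PySem.List.pyRange 0 ((s.toList.length : Int)) 1).foldl (fun alph i =>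
            let idx : Int := ((PySem.List.pyGetD s.toList i ' ').toNat : Int) - 97
            PySem.List.pySetD alph idx (PySem.List.pyGetD alph idx [] ++ [i]))
          ((List.range 26).map (fun _ => ([] : List Int)))
        = (PySem.List.enumerate s.toList 0).foldl (fun alph p =>
            let idx : Int := ((p.2.toNat : Int)) - 97
            PySem.List.pySetD alph idx (PySem.List.pyGetD alph idx [] ++ [p.1]))
          ((List.range 26).map (fun _ => ([] : List Int))) := by
      rw [PySem.List.enumerate_eq_map_pyRange s.toList ' ', List.foldl_map,
        PySem.List.len_eq]
    rw [hAfold]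
    have hinv := loop_inv s.toList hall 0
      ((List.range 26).map (fun _ => ([] : List Int)))
      (List.replicate 26 none) (List.replicate 26 false)
      (by simp) (by simp) (by simp)
      (fun k hk => by
        rw [getD_map_range_nil]
        constructor
        · rw [List.getD_eq_getElem?_getD, List.getElem?_replicate]
          simp [hk]
        · rw [List.getD_eq_getElem?_getD, List.getElem?_replicate]
          simp [hk, hasGap])
    obtain ⟨halF, hlonF, hrelF⟩ := hinv
    set alF := (PySem.List.enumerate s.toList 0).foldl (fun alph p =>
        let idx : Int := ((p.2.toNat : Int)) - 97
        PySem.List.pySetD alph idx (PySem.List.pyGetD alph idx [] ++ [p.1]))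
      ((List.range 26).map (fun _ => ([] : List Int))) with halFdef
    set stF := (PySem.List.enumerate s.toList 0).foldl
      (fun (st : List (Option Int) × List Bool) p =>
        let idx : Int := ((p.2.toNat : Int)) - 97
        let lonely := match PySem.List.pyGetD st.1 idx none with
          | some j => if p.1 - j > 1 then PySem.List.pySetD st.2 idx true else st.2
          | none => st.2
        (PySem.List.pySetD st.1 idx (some p.1), lonely))
      (List.replicate 26 none, List.replicate 26 false) with hstFdef
    -- the two answer lists coincide
    have hans :
        (PySem.List.pyRange 0 26 1).foldl (fun ans i =>
          let bucket := PySem.List.pyGetD alF i []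
          if (2 ≤ bucket.length) && pvABreak bucket (PySem.List.pyRange 0 ((bucket.length : Int) - 1) 1)
          then ans ++ [Char.ofNat (i.toNat + 97)] else ans) []
        = ((List.range 26).filter (fun k : Nat => PySem.List.pyGetD stF.2 ((k : Int)) false)).map
            (fun k => Char.ofNat (k + 97)) := by
      rw [PySem.List.foldl_append_if
        (fun i => (2 ≤ (PySem.List.pyGetD alF i []).length) && pvABreak (PySem.List.pyGetD alF i [])
          (PySem.List.pyRange 0 (((PySem.List.pyGetD alF i []).length : Int) - 1) 1))
        (fun i => Char.ofNat (i.toNat + 97))]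
      rw [show (26 : Int) = ((26 : Nat) : Int) from by norm_num,
        PySem.List.pyRange_zero_nat, List.filter_map, List.map_map]
      rw [List.nil_append]
      have hfil : ∀ k ∈ List.range 26,
          ((fun i => (2 ≤ (PySem.List.pyGetD alF i []).length) && pvABreak (PySem.List.pyGetD alF i [])
            (PySem.List.pyRange 0 (((PySem.List.pyGetD alF i []).length : Int) - 1) 1)) ∘ (fun k : Nat => (k : Int))) k
          = (fun k : Nat => PySem.List.pyGetD stF.2 ((k : Int)) false) k := by
        intro k hk
        have hk26 : k < 26 := List.mem_range.mp hk
        simp only [Function.comp]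
        rw [PySem.List.pyGetD_natCast, PySem.List.pyGetD_natCast]
        have hbr := pvABreak_eq (alF.getD k []) 0
        rw [Nat.cast_zero, List.drop_zero] at hbr
        rw [hbr, hrelF k hk26]
        cases hg : hasGap (alF.getD k []) with
        | false => simp
        | true =>
          have hlen : 2 ≤ (alF.getD k []).length := by
            by_contra hlt
            rw [hasGap_short _ (by omega)] at hg
            exact Bool.false_ne_true hg
          rw [Bool.and_true]
          exact decide_eq_true hlen
      rw [List.filter_congr hfil]
      apply List.map_congr_left
      intro k _
      simp
    rw [hans]
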